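-- pv_equiv track=rewrite | github.com/MartinGanly/WebScience | lib/centrality.py | in_out_centrality
-- ===== SOURCE A (Python) =====
-- def in_out_centrality(data):
--     if len(data) == 0:
--         return None, None
--     in_degree = {}
--     out_degree = {}
--     for user, connects in data.items():
--         for connect in connects:
--             if not user in out_degree:
--                 out_degree[user] = 1
--             else:
--                 out_degree[user] = out_degree[user] + 1
--             if not connect in in_degree:
--                 in_degree[connect] = 1
--             else:
--                 in_degree[connect] = in_degree[connect] + 1
--     return in_degree, out_degree
-- ===== SOURCE B (Python) =====
-- def in_out_centrality(data):
--     if len(data) == 0: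
--         return None, None
--     out_degree = {user: len(connects) for user, connects in data.items() if connects}
--     flat = [c for connects in data.values() for c in connects]
--     in_degree = {}
--     for c in flat:
--         in_degree[c] = in_degree.get(c, 0) + 1
--     return in_degree, out_degree
-- ===== Notes on version B (the rewrite author's own statement) =====
-- stated objective: simpler
-- what changed: Replaces A's nested per-edge loop that maintains two dicts with membership-test branches by three independent steps: out_degree as a {user: len(connects)} comprehension over nonempty lists, a flattening comprehension of all targets, and one tally pass with dict.get; Pre_ excludes association lists with duplicate keys, which do not represent any Python dict, so no input the Python A accepts is excluded.
import Mathlib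
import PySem

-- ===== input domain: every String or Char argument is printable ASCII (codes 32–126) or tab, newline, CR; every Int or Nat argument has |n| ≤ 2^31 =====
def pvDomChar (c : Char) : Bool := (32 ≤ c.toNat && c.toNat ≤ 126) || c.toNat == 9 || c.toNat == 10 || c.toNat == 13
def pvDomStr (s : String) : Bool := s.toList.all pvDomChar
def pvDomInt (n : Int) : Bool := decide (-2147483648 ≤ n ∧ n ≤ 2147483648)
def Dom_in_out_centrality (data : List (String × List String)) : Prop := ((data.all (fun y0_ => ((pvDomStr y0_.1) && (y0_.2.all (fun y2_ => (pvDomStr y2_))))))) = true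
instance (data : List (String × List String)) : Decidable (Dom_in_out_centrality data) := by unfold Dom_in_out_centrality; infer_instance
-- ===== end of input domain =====

-- B replaces the per-edge increment loop by a len-based dict comprehension (out-degree)
-- and a flatten-then-tally comprehension (in-degree): simpler, no mutation loop; same return value.

-- ===== PORT A =====
-- one iteration of A's inner 'for connect in connects' loop; state = (in_degree, out_degree)
def pvStepA (u : String) (st : PySem.Dict String Int × PySem.Dict String Int) (c : String) :
    PySem.Dict String Int × PySem.Dict String Int :=
  let od := if !(st.2.contains u) then st.2.insert u 1 else st.2.insert u (st.2.getD u 0 + 1)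
  let id := if !(st.1.contains c) then st.1.insert c 1 else st.1.insert c (st.1.getD c 0 + 1)
  (id, od)

def in_out_centrality (data : List (String × List String)) :
    (Option (List (String × Int))) × (Option (List (String × Int))) :=
  if data.length == 0 then (none, none)
  else
    let st := data.foldl (fun st uc => uc.2.foldl (pvStepA uc.1) st)
      ((PySem.Dict.empty : PySem.Dict String Int), (PySem.Dict.empty : PySem.Dict String Int))
    (some st.1.items, some st.2.items)

-- ===== PORT B =====
def in_out_centrality_alt (data : List (String × List String)) :
    (Option (List (String × Int))) × (Option (List (String × Int))) :=
  if data.length == 0 then (none, none)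
  else
    let out_degree := (data.filter (fun p => !p.2.isEmpty)).map (fun p => (p.1, (p.2.length : Int)))
    let flat := data.flatMap (·.2)
    let in_degree := flat.foldl (fun d c => d.insert c (d.getD c 0 + 1))
      (PySem.Dict.empty : PySem.Dict String Int)
    (some in_degree.items, some out_degree)

-- ===== PRECONDITION & SPEC =====
-- Pre_ excludes association lists with duplicate keys: those do not represent any Python dict
-- (data is a dict in A), so no input A accepts is excluded.
def Pre_in_out_centrality (data : List (String × List String)) : Prop :=
  (data.map Prod.fst).Nodup
instance (data : List (String × List String)) : Decidable (Pre_in_out_centrality data) := by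
  unfold Pre_in_out_centrality; infer_instance

def pvWitness_in_out_centrality : (List (String × List String)) :=
  [("a", ["b", "b", "a"]), ("c", [])]

def Spec_in_out_centrality (data : List (String × List String))
    (out : (Option (List (String × Int))) × (Option (List (String × Int)))) : Prop :=
  out = in_out_centrality_alt data
instance (data : List (String × List String))
    (out : (Option (List (String × Int))) × (Option (List (String × Int)))) :
    Decidable (Spec_in_out_centrality data out) := by unfold Spec_in_out_centrality; infer_instance

-- ===== CLAIM (what is proved, stated in full; the proofs are below) =====
def Claim_equal_in_out_centrality : Prop :=
  ∀ (data : List (String × List String)), Dom_in_out_centrality data →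
    Pre_in_out_centrality data → Spec_in_out_centrality data (in_out_centrality data)

-- ===== LEMMAS AND PROOFS =====

-- A's two branches both amount to insert with getD + 1
theorem pvStepA_eq (u : String) (st : PySem.Dict String Int × PySem.Dict String Int) (c : String) :
    pvStepA u st c = (st.1.insert c (st.1.getD c 0 + 1), st.2.insert u (st.2.getD u 0 + 1)) := by
  cases ho : st.2.contains u <;> cases hi : st.1.contains c <;>
    simp [pvStepA, ho, hi, PySem.Dict.getD_of_not_contains]

-- the in_degree component of A's inner loop is the counting fold
theorem pvInner_fst (cs : List String) (u : String)
    (st : PySem.Dict String Int × PySem.Dict String Int) :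
    (cs.foldl (pvStepA u) st).1 = cs.foldl (fun d c => d.insert c (d.getD c 0 + 1)) st.1 := by
  induction cs generalizing st with
  | nil => rfl
  | cons c rest ih => simp [List.foldl_cons, pvStepA_eq, ih]

-- the out_degree component of A's inner loop: one insert adding the list length
theorem pvInner_snd (cs : List String) (u : String)
    (st : PySem.Dict String Int × PySem.Dict String Int) (h : cs ≠ []) :
    (cs.foldl (pvStepA u) st).2 = st.2.insert u (st.2.getD u 0 + (cs.length : Int)) := by
  induction cs generalizing st with
  | nil => exact absurd rfl h
  | cons c rest ih =>
    by_cases hr : rest = []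
    · subst hr; simp [List.foldl_cons, pvStepA_eq]
    · rw [List.foldl_cons, pvStepA_eq, ih _ hr]
      simp only [PySem.Dict.getD_insert_self, PySem.Dict.insert_insert_self, List.length_cons]
      push_cast; ring_nf

-- the in_degree component of A's outer loop is the counting fold over the flattened targets
theorem pvOuter_fst (data : List (String × List String))
    (st : PySem.Dict String Int × PySem.Dict String Int) :
    (data.foldl (fun st uc => uc.2.foldl (pvStepA uc.1) st) st).1
      = (data.flatMap (·.2)).foldl (fun d c => d.insert c (d.getD c 0 + 1)) st.1 := by
  induction data generalizing st with
  | nil => rfl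
  | cons uc rest ih =>
    rw [List.foldl_cons, ih, List.flatMap_cons, List.foldl_append, pvInner_fst]

-- the out_degree component of A's outer loop appends (user, len) for each nonempty list
theorem pvOuter_snd (data : List (String × List String))
    (st : PySem.Dict String Int × PySem.Dict String Int)
    (hnd : st.2.keys.Nodup) (hpre : (data.map Prod.fst).Nodup)
    (hfresh : ∀ u ∈ data.map Prod.fst, st.2.contains u = false) :
    (data.foldl (fun st uc => uc.2.foldl (pvStepA uc.1) st) st).2.items
      = st.2.items
        ++ (data.filter (fun p => !p.2.isEmpty)).map (fun p => (p.1, (p.2.length : Int))) := by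
  induction data generalizing st with
  | nil => simp
  | cons uc rest ih =>
    obtain ⟨u, cs⟩ := uc
    simp only [List.map_cons, List.nodup_cons, List.mem_map] at hpre
    have hfu : st.2.contains u = false := hfresh u (by simp)
    by_cases hcs : cs = []
    · subst hcs
      rw [List.foldl_cons]
      have : ([] : List String).foldl (pvStepA u) st = st := rfl
      rw [this, ih st hnd hpre.2 (fun v hv => hfresh v (by simp [hv]))]
      simp
    · rw [List.foldl_cons]
      set st' := cs.foldl (pvStepA u) st with hst'
      have h2 : st'.2 = st.2.insert u (st.2.getD u 0 + (cs.length : Int)) := pvInner_snd cs u st hcs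
      have hg0 : st.2.getD u 0 = 0 := PySem.Dict.getD_of_not_contains _ _ hfu
      have hnk : u ∉ st.2.keys := by
        intro hu
        have := (PySem.Dict.contains_iff_mem_keys st.2 u).2 hu
        simp [hfu] at this
      have hnd' : st'.2.keys.Nodup := by
        rw [h2, PySem.Dict.keys_insert_of_not_contains _ _ hfu]
        simp only [List.nodup_append]
        refine ⟨hnd, List.nodup_singleton u, ?_⟩
        intro a ha b hb
        simp only [List.mem_singleton] at hb
        subst hb
        rintro rfl
        exact hnk ha
      have hfresh' : ∀ v ∈ rest.map Prod.fst, st'.2.contains v = false := by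
        intro v hv
        rw [h2, PySem.Dict.contains_insert]
        have hvne : v ≠ u := by
          rintro rfl
          exact hpre.1 (by simpa using hv)
        simp [hvne, hfresh v (by simp [hv])]
      rw [ih st' hnd' hpre.2 hfresh', h2, PySem.Dict.items_insert_of_not_contains _ _ hfu, hg0]
      simp [hcs]

-- ===== VERDICT (by name: the statement is the Claim_ definition above) =====
theorem in_out_centrality_spec : Claim_equal_in_out_centrality := by
  intro data _ hpre
  unfold Spec_in_out_centrality in_out_centrality in_out_centrality_alt
  by_cases hd : data = []
  · subst hd; rfl
  · have hlen : (data.length == 0) = false := by simp [hd]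
    rw [hlen]
    simp only [Bool.false_eq_true, if_false]
    refine Prod.ext ?_ ?_
    · simp only [Option.some.injEq]
      rw [pvOuter_fst]
    · simp only [Option.some.injEq]
      rw [pvOuter_snd data _ (by simp) hpre (by simp)]
      simp [PySem.Dict.empty]
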